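-- pv_equiv track=rewrite | github.com/Bonubase/dicom2rdf | gen_source/parse.py | ischapter
-- ===== SOURCE A (Python) =====
-- def ischapter(s):
--     if len(s)>=2 and s[1]=='.' and s[0] in "ABC":
--         s=s[2:]
--     if not s:
--         return False
--     for c in s:
--         if c not in "0123456789.":
--             return False
--     return True
-- ===== SOURCE B (Python) =====
-- import re
--
-- _CHAPTER_RE = re.compile(r'(?:[ABC]\.)?[0-9.]+')
--
-- def ischapter(s):
--     return bool(_CHAPTER_RE.fullmatch(s))
-- ===== Notes on version B (the rewrite author's own statement) =====
-- stated objective: idiomatic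
-- what changed: Replaces the manual prefix-strip plus per-character scan with a single precompiled regex fullmatch r'(?:[ABC]\.)?[0-9.]+'.
import Mathlib
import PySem

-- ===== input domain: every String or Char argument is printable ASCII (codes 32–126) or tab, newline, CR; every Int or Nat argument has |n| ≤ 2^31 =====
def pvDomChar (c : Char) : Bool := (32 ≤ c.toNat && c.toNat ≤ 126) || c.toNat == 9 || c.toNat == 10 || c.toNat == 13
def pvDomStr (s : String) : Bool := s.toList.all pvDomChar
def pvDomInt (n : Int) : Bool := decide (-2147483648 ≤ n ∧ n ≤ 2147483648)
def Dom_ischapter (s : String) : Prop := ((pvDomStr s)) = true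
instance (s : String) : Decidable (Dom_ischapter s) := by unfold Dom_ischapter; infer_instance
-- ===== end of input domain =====

-- B replaces A's manual prefix-strip plus per-character scan by one regex fullmatch
-- (ported below as a hand-written matcher for that fixed regex); objective: idiomatic.

-- ===== PORT A =====
-- the membership test `c in "0123456789."` / `c in "ABC"`
def chClass (c : Char) : Bool := "0123456789.".toList.contains c

-- the for-loop with its early `return False`
def ischapterLoop : List Char → Bool
  | [] => true
  | c :: cs => if chClass c then ischapterLoop cs else false

def ischapterCore (l : List Char) : Bool :=
  -- `len(s)>=2 and s[1]=='.' and s[0] in "ABC"`; s[0]/s[1] are safe under the length guard,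
  -- so the `.getD ' '` default is never consulted
  let l2 := if decide (2 ≤ l.length) && (PySem.List.pyGet? l 1 == some '.')
               && ("ABC".toList.contains ((PySem.List.pyGet? l 0).getD ' '))
            then PySem.List.slice l (some 2) none else l
  if l2.isEmpty then false else ischapterLoop l2

def ischapter (s : String) : Bool := ischapterCore s.toList

-- ===== PORT B =====
-- hand-written exact matcher for re.fullmatch(r'(?:[ABC]\.)?[0-9.]+', s):
-- the greedy optional group tries `[ABC]\.` first and backtracks to the empty
-- alternative if the rest fails; `[0-9.]+` is a non-empty all-in-class check.
def reTail (l : List Char) : Bool := !l.isEmpty && l.all chClass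

def ischapterAltCore (l : List Char) : Bool :=
  match l with
  | a :: '.' :: rest =>
      if "ABC".toList.contains a && reTail rest then true else reTail l
  | l => reTail l

def ischapter_alt (s : String) : Bool := ischapterAltCore s.toList

-- ===== PRECONDITION & SPEC =====
def Spec_ischapter (s : String) (out : Bool) : Prop := out = ischapter_alt s
instance (s : String) (out : Bool) : Decidable (Spec_ischapter s out) := by unfold Spec_ischapter; infer_instance

-- ===== CLAIM (what is proved, stated in full; the proofs are below) =====
def Claim_equal_ischapter : Prop := ∀ (s : String), Dom_ischapter s → Spec_ischapter s (ischapter s)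

-- ===== LEMMAS AND PROOFS =====
theorem pyGet1 (x y : Char) (l : List Char) : PySem.List.pyGet? (x :: y :: l) 1 = some y := by
  simp [PySem.List.pyGet?, PySem.List.pyIdx?]

theorem pyGet0 (x : Char) (l : List Char) : PySem.List.pyGet? (x :: l) 0 = some x := by
  simp [PySem.List.pyGet?, PySem.List.pyIdx?]

theorem slice2 (x y : Char) (l : List Char) : PySem.List.slice (x :: y :: l) (some 2) none = l := by
  simp [PySem.List.slice, PySem.List.clampIdx]

theorem loop_eq_all (l : List Char) : ischapterLoop l = l.all chClass := by
  induction l with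
  | nil => rfl
  | cons c cs ih =>
      by_cases h : chClass c <;> simp [ischapterLoop, List.all_cons, ih, h]

theorem core_eq (l : List Char) : ischapterCore l = ischapterAltCore l := by
  match l with
  | [] => rfl
  | [a] =>
      simp [ischapterCore, ischapterAltCore, reTail, loop_eq_all]
  | a :: b :: rest =>
      by_cases hb : b = '.'
      · subst hb
        by_cases ha : "ABC".toList.contains a
        · have habc : a = 'A' ∨ a = 'B' ∨ a = 'C' := by
            simpa [List.contains_eq_mem] using ha
          obtain h | h | h := habc <;> subst h <;>
            · simp only [ischapterCore, ischapterAltCore]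
              rw [pyGet0, pyGet1, slice2]
              simp [reTail, loop_eq_all]
              by_cases hr : rest = []
              · simp [hr, chClass]
              · cases hall : rest.all chClass <;>
                  simp_all [chClass, List.all_eq_true, List.all_eq_false]
        · have hne : ¬(a = 'A' ∨ a = 'B' ∨ a = 'C') := by
            simpa [List.contains_eq_mem] using ha
          push Not at hne
          obtain ⟨h1, h2, h3⟩ := hne
          simp only [ischapterCore, ischapterAltCore]
          rw [pyGet0, pyGet1]
          simp [h1, h2, h3, reTail, loop_eq_all, chClass]
      · simp only [ischapterCore]
        rw [show (ischapterAltCore (a :: b :: rest)) = reTail (a :: b :: rest) by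
              cases b; simp_all [ischapterAltCore]]
        rw [pyGet0, pyGet1]
        simp [hb, reTail, loop_eq_all]

-- ===== VERDICT (by name: the statement is the Claim_ definition above) =====
theorem ischapter_spec : Claim_equal_ischapter := by
  intro s _
  unfold Spec_ischapter ischapter ischapter_alt
  exact core_eq s.toList
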